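-- pv_equiv track=rewrite | github.com/bornkesselpascal/university | python/gdp-python/Klausurvorbereitung/Blatt 7/c.py | dreifachkonsonanten
-- ===== SOURCE A (Python) =====
-- def dreifachkonsonanten(satz):
--     ergebnisse = list()
--
--     i = 0
--     while i < len(satz):
--         j = i + 1
--         while j < len(satz) and satz[j] == satz[j-1]:
--             j+=1
--
--         if j-i >= 3:
--             if(satz[i] not in 'aeiou'):
--                 ergebnisse.append(satz[i])
--
--         i = j
--
--     return ergebnisse
-- ===== SOURCE B (Python) =====
-- def dreifachkonsonanten(satz):
--     # consume the string from the END: strip each trailing run with rstrip,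
--     # collect qualifying consonants in reverse, then reverse the result
--     ergebnisse = []
--     s = satz
--     while s:
--         c = s[-1]
--         rest = s.rstrip(c)
--         if len(s) - len(rest) >= 3 and c not in 'aeiou':
--             ergebnisse.append(c)
--         s = rest
--     return ergebnisse[::-1]
-- ===== Notes on version B (the rewrite author's own statement) =====
-- stated objective: alternative
-- what changed: B traverses the string in the OPPOSITE direction: it repeatedly strips the trailing run with str.rstrip (delegating the character scan to the library, no inner index loop), collects qualifying consonants in reverse order, and reverses the result at the end, instead of A's forward nested index-walk.
import Mathlib
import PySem

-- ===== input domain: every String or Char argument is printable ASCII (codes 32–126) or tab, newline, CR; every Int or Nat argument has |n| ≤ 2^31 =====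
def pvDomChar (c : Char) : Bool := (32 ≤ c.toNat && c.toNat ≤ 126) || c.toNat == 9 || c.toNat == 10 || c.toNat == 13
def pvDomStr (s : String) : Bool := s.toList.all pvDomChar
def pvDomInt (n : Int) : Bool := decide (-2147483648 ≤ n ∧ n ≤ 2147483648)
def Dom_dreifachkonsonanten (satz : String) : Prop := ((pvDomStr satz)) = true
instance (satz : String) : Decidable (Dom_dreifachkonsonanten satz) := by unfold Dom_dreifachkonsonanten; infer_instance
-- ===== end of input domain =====

-- B consumes the string back-to-front, stripping each trailing run with rstrip and reversing the collected answers; alternative traversal order, same cost.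


-- ===== PORT A =====
-- inner while loop of A: advance j while j < len(satz) and satz[j] == satz[j-1]
-- (getD is exact here: the guard keeps j, and hence j-1, in range)
def drkInner (cs : List Char) (j : Nat) : Nat :=
  if h : j < cs.length ∧ cs.getD j ' ' = cs.getD (j-1) ' ' then drkInner cs (j+1) else j
termination_by cs.length - j
decreasing_by omega

-- needed by drkOuter's termination proof
theorem drkInner_ge (cs : List Char) (j : Nat) : j ≤ drkInner cs j := by
  unfold drkInner
  split
  · have := drkInner_ge cs (j+1); omega
  · exact Nat.le_refl j
termination_by cs.length - j
decreasing_by rename_i h; omega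

-- outer while loop of A (j inlined; it is used for the length test and as the next i)
def drkOuter (cs : List Char) (i : Nat) : List String :=
  if h : i < cs.length then
    (if 3 ≤ drkInner cs (i+1) - i ∧ cs.getD i ' ' ∉ ['a','e','i','o','u']
      then [String.mk [cs.getD i ' ']] else [])
      ++ drkOuter cs (drkInner cs (i+1))
  else []
termination_by cs.length - i
decreasing_by have := drkInner_ge cs (i+1); omega

def dreifachkonsonanten (satz : String) : List String := drkOuter satz.toList 0

-- ===== PORT B =====
-- s.rstrip(c) for a single character c: drop the trailing run of c
def rstripRun (s : List Char) (c : Char) : List Char := (s.reverse.dropWhile (· = c)).reverse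

-- termination of B's while loop: rstrip with the last character removes at least one character
theorem rstripRun_length_lt (s : List Char) (h : s ≠ []) :
    (rstripRun s (s.getLast h)).length < s.length := by
  unfold rstripRun
  have hr : s.reverse ≠ [] := by simpa using h
  obtain ⟨a, t, hat⟩ := List.exists_cons_of_ne_nil hr
  have hs : s = t.reverse ++ [a] := by
    rw [← List.reverse_reverse s, hat]; simp
  have ha : s.getLast h = a := by
    simp [hs, List.getLast_append]
  have hlen : s.length = t.length + 1 := by
    have : s.reverse.length = t.length + 1 := by rw [hat]; simp
    simpa using this
  rw [hat, List.dropWhile_cons]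
  simp only [ha, decide_true, if_true]
  have := List.length_dropWhile_le (· = a) t
  simp only [List.length_reverse]
  omega

-- B's while loop: c = s[-1]; rest = s.rstrip(c); conditionally append c; s = rest
def bLoop (s : List Char) (acc : List String) : List String :=
  if h : s ≠ [] then
    bLoop (rstripRun s (s.getLast h))
      (if 3 ≤ s.length - (rstripRun s (s.getLast h)).length ∧
          s.getLast h ∉ ['a','e','i','o','u']
        then acc ++ [String.mk [s.getLast h]] else acc)
  else acc
termination_by s.length
decreasing_by exact rstripRun_length_lt s h

-- return ergebnisse[::-1]
def dreifachkonsonanten_alt (satz : String) : List String := (bLoop satz.toList []).reverse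

-- ===== PRECONDITION & SPEC =====
def Spec_dreifachkonsonanten (satz : String) (out : List String) : Prop := out = dreifachkonsonanten_alt satz
instance (satz : String) (out : List String) : Decidable (Spec_dreifachkonsonanten satz out) := by unfold Spec_dreifachkonsonanten; infer_instance

-- ===== CLAIM (what is proved, stated in full; the proofs are below) =====
def Claim_equal_dreifachkonsonanten : Prop := ∀ (satz : String), Dom_dreifachkonsonanten satz → Spec_dreifachkonsonanten satz (dreifachkonsonanten satz)

-- ===== LEMMAS AND PROOFS =====

-- common reference: emit the head run (if long enough and a consonant), recurse on the rest
def drkEmit (c : Char) (n : Nat) : List String :=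
  if 3 ≤ n ∧ c ∉ ['a','e','i','o','u'] then [String.mk [c]] else []

def drkSpec : List Char → List String
  | [] => []
  | c :: rest =>
      drkEmit c (1 + (rest.takeWhile (· = c)).length) ++ drkSpec (rest.dropWhile (· = c))
termination_by l => l.length
decreasing_by
  have := List.length_dropWhile_le (· = c) rest
  simp; omega

theorem drkInner_eq (cs : List Char) (j : Nat) :
    drkInner cs j = j + ((cs.drop j).takeWhile (· = cs.getD (j-1) ' ')).length := by
  unfold drkInner
  split
  · rename_i h
    obtain ⟨hj, he⟩ := h
    have hd : cs.drop j = cs[j] :: cs.drop (j+1) := List.drop_eq_getElem_cons hj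
    have hg : cs.getD j ' ' = cs[j] := List.getD_eq_getElem cs ' ' hj
    have hrec := drkInner_eq cs (j+1)
    simp only [Nat.add_sub_cancel] at hrec
    simp only [he] at hrec
    rw [hrec, hd, List.takeWhile_cons]
    have hhead : cs[j] = cs.getD (j-1) ' ' := by rw [← hg]; exact he
    simp only [hhead, decide_true, if_true, List.length_cons]
    omega
  · rename_i h
    rcases Nat.lt_or_ge j cs.length with hj | hj
    · have hd : cs.drop j = cs[j] :: cs.drop (j+1) := List.drop_eq_getElem_cons hj
      have hg : cs.getD j ' ' = cs[j] := List.getD_eq_getElem cs ' ' hj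
      have hne : ¬ cs[j] = cs.getD (j-1) ' ' := by
        rw [← hg]; exact fun hc => h ⟨hj, hc⟩
      rw [hd, List.takeWhile_cons]
      simp only [List.getD] at hne ⊢
      simp [hne]
    · rw [List.drop_eq_nil_of_le hj]; simp
termination_by cs.length - j
decreasing_by rename_i h; omega

theorem drop_length_takeWhile' (p : Char → Bool) (l : List Char) :
    l.drop (l.takeWhile p).length = l.dropWhile p := by
  induction l with
  | nil => rfl
  | cons a l ih =>
    cases h : p a <;>
      simp [List.takeWhile_cons, List.dropWhile_cons, h, List.drop_succ_cons, ih]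

theorem drop_after_run (rest : List Char) (c : Char) (i : Nat) (cs : List Char)
    (hrest : cs.drop (i+1) = rest) :
    cs.drop (i + 1 + (rest.takeWhile (· = c)).length) = rest.dropWhile (· = c) := by
  have h1 : cs.drop (i + 1 + (rest.takeWhile (· = c)).length)
      = rest.drop ((rest.takeWhile (· = c)).length) := by
    rw [← hrest, List.drop_drop, Nat.add_comm]
  rw [h1, drop_length_takeWhile']

theorem drkOuter_eq_spec (cs : List Char) (i : Nat) :
    drkOuter cs i = drkSpec (cs.drop i) := by
  rw [drkOuter]
  split
  · rename_i hi
    have hg : cs.getD i ' ' = cs[i] := List.getD_eq_getElem cs ' ' hi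
    have hin : drkInner cs (i+1)
        = i + 1 + ((cs.drop (i+1)).takeWhile (· = cs[i])).length := by
      have h0 := drkInner_eq cs (i+1)
      simp only [Nat.add_sub_cancel, hg] at h0
      exact h0
    have hdrop : cs.drop (drkInner cs (i+1)) = (cs.drop (i+1)).dropWhile (· = cs[i]) := by
      rw [hin]; exact drop_after_run (cs.drop (i+1)) cs[i] i cs rfl
    rw [drkOuter_eq_spec cs (drkInner cs (i+1)), hdrop]
    rw [List.drop_eq_getElem_cons hi, drkSpec]
    congr 1
    rw [drkEmit, hg, hin]
    simp only [show ∀ t : Nat, i + 1 + t - i = 1 + t from fun t => by omega]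
  · rename_i hi
    rw [List.drop_eq_nil_of_le (by omega), drkSpec]
termination_by cs.length - i
decreasing_by have := drkInner_ge cs (i+1); rename_i hi _; omega

-- ---- B-side: the last-run decomposition and the loop invariant ----

-- the trailing run stripped by rstrip really is a replicate block, and the
-- remainder does not end in c
theorem rstrip_decomp (s : List Char) (h : s ≠ []) :
    s = rstripRun s (s.getLast h) ++
        List.replicate (s.length - (rstripRun s (s.getLast h)).length) (s.getLast h) ∧
    (∀ h' : rstripRun s (s.getLast h) ≠ [],
        (rstripRun s (s.getLast h)).getLast h' ≠ s.getLast h) ∧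
    1 ≤ s.length - (rstripRun s (s.getLast h)).length := by
  set c := s.getLast h with hc
  set r := s.reverse with hrr
  have htw : r.takeWhile (· = c) = List.replicate (r.takeWhile (· = c)).length c := by
    apply List.eq_replicate_of_mem
    intro b hb
    have := List.mem_takeWhile_imp hb
    simpa using this
  have hsplit : r = r.takeWhile (· = c) ++ r.dropWhile (· = c) :=
    (List.takeWhile_append_dropWhile).symm
  have hs : s = (r.dropWhile (· = c)).reverse
      ++ List.replicate (r.takeWhile (· = c)).length c := by
    conv_lhs => rw [← List.reverse_reverse s, ← hrr, hsplit]
    rw [List.reverse_append, htw]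
    simp
  have hr : r ≠ [] := by simp [hrr, h]
  have hhead? : r.head? = some c := by
    rw [hrr, List.head?_reverse, hc]
    exact List.getLast?_eq_getLast h
  have htwne : r.takeWhile (· = c) ≠ [] := by
    cases hre : r with
    | nil => exact absurd hre hr
    | cons a t =>
      have ha : a = c := by rw [hre] at hhead?; simpa using hhead?
      simp [List.takeWhile_cons, ha]
  have hlen : s.length - (rstripRun s c).length = (r.takeWhile (· = c)).length := by
    have h1 : r.length = (r.takeWhile (· = c)).length + (r.dropWhile (· = c)).length := by
      have := congrArg List.length hsplit
      rwa [List.length_append] at this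
    have h2 : s.length = r.length := by simp [hrr]
    have h3 : (rstripRun s c).length = (r.dropWhile (· = c)).length := by
      simp [rstripRun, ← hrr]
    omega
  refine ⟨?_, ?_, ?_⟩
  · rw [hlen]; simpa [rstripRun, ← hrr] using hs
  · intro h'
    have hdne : r.dropWhile (· = c) ≠ [] := by
      simp only [rstripRun, ← hrr] at h'
      intro hcon; rw [hcon] at h'; simp at h'
    have hhd : ¬ ((r.dropWhile (· = c)).head hdne = c) := by
      have := List.head_dropWhile_not (p := (· = c)) hdne
      simpa using this
    have : (rstripRun s c).getLast h' = (r.dropWhile (· = c)).head hdne := by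
      simp only [rstripRun, ← hrr]
      exact List.getLast_reverse _
    rw [this]; exact hhd
  · rw [hlen]
    have := List.length_pos_iff.mpr htwne
    omega

theorem drkSpec_replicate (c : Char) (k : Nat) (hk : 1 ≤ k) :
    drkSpec (List.replicate k c) = drkEmit c k := by
  obtain ⟨k', rfl⟩ : ∃ k', k = k' + 1 := ⟨k - 1, by omega⟩
  rw [List.replicate_succ, drkSpec]
  have htw : (List.replicate k' c).takeWhile (· = c) = List.replicate k' c := by
    simp [List.takeWhile_replicate]
  have hdw : (List.replicate k' c).dropWhile (· = c) = [] := by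
    simp [List.dropWhile_replicate]
  rw [htw, hdw, drkSpec]
  simp [Nat.add_comm]

theorem drkSpec_append_replicate_aux (c : Char) (k : Nat) (hk : 1 ≤ k) :
    ∀ (n : Nat) (xs : List Char), xs.length ≤ n →
    (∀ h' : xs ≠ [], xs.getLast h' ≠ c) →
    drkSpec (xs ++ List.replicate k c) = drkSpec xs ++ drkEmit c k := by
  intro n
  induction n with
  | zero =>
    intro xs hlen _
    have hx : xs = [] := List.eq_nil_of_length_eq_zero (by omega)
    subst hx
    simpa [drkSpec] using drkSpec_replicate c k hk
  | succ n ih =>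
    intro xs hlen hlast
    cases xs with
    | nil => simpa [drkSpec] using drkSpec_replicate c k hk
    | cons x xs' =>

        have hxne : (x :: xs') ≠ [] := by simp
        by_cases hall : ∀ b ∈ xs', b = x
        · have hxc : x ≠ c := by
            cases hxs' : xs' with
            | nil => have := hlast hxne; simpa [hxs'] using this
            | cons y t =>
              have hne : xs' ≠ [] := by simp [hxs']
              have h1 : (x :: xs').getLast hxne = xs'.getLast hne := List.getLast_cons hne
              have h2 := hlast hxne
              rw [h1] at h2
              have := hall (xs'.getLast hne) (List.getLast_mem hne)
              rw [this] at h2; exact h2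
          have hdwnil : xs'.dropWhile (· = x) = [] := by
            rw [List.dropWhile_eq_nil_iff]
            intro b hb; simpa using hall b hb
          have htwself : xs'.takeWhile (· = x) = xs' := by
            have := List.takeWhile_append_dropWhile (p := (· = x)) (l := xs')
            rwa [hdwnil, List.append_nil] at this
          have hcx : ¬ (c = x) := fun hc => hxc hc.symm
          have htwrep : (List.replicate k c).takeWhile (· = x) = [] := by
            rw [List.takeWhile_replicate]; simp [hcx]
          have hdwrep : (List.replicate k c).dropWhile (· = x) = List.replicate k c := by
            rw [List.dropWhile_replicate]; simp [hcx]
          rw [List.cons_append, drkSpec, List.takeWhile_append, List.dropWhile_append]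
          rw [htwself, hdwnil]
          simp only [List.isEmpty_nil, if_true, if_pos rfl]
          rw [htwrep, hdwrep, List.append_nil, drkSpec_replicate c k hk]
          rw [drkSpec, htwself, hdwnil, drkSpec]
          simp [List.append_assoc]
        · push_neg at hall
          obtain ⟨b, hb, hbx⟩ := hall
          have hdwne : xs'.dropWhile (· = x) ≠ [] := by
            rw [Ne, List.dropWhile_eq_nil_iff]
            push_neg
            exact ⟨b, hb, by simpa using hbx⟩
          have hsum : (xs'.takeWhile (· = x)).length + (xs'.dropWhile (· = x)).length
              = xs'.length := by
            have := congrArg List.length (List.takeWhile_append_dropWhile (p := (· = x)) (l := xs'))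
            rwa [List.length_append] at this
          have hlenne : ¬ ((xs'.takeWhile (· = x)).length = xs'.length) := by
            intro hc
            have : (xs'.dropWhile (· = x)).length = 0 := by omega
            exact hdwne (List.eq_nil_of_length_eq_zero this)
          have hne : ¬ ((xs'.dropWhile (· = x)).isEmpty = true) := by
            simpa [List.isEmpty_iff] using hdwne
          have hxs'ne : xs' ≠ [] := by intro hc; rw [hc] at hb; cases hb
          have hlast' : ∀ h' : xs'.dropWhile (· = x) ≠ [],
              (xs'.dropWhile (· = x)).getLast h' ≠ c := by
            intro h'
            obtain ⟨t, ht⟩ := List.dropWhile_suffix (p := (· = x)) (l := xs')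
            have hg : (xs'.dropWhile (· = x)).getLast h' = xs'.getLast hxs'ne := by
              have h1 : (xs'.dropWhile (· = x)).getLast? = xs'.getLast? := by
                conv_rhs => rw [← ht]
                exact (List.getLast?_append_of_ne_nil t h').symm
              rw [List.getLast?_eq_getLast h', List.getLast?_eq_getLast hxs'ne] at h1
              exact Option.some_injective _ h1
            have h2' : (x :: xs').getLast hxne = xs'.getLast hxs'ne := List.getLast_cons hxs'ne
            have := hlast hxne
            rw [h2'] at this
            rw [hg]; exact this
          rw [List.cons_append, drkSpec, List.takeWhile_append, List.dropWhile_append]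
          rw [if_neg hlenne, if_neg hne]
          rw [ih (xs'.dropWhile (· = x))
          (by have := List.length_dropWhile_le (fun b => decide (b = x)) xs'
              simp only [List.length_cons] at hlen; omega) hlast', drkSpec]
          simp [List.append_assoc]

theorem drkSpec_append_replicate (c : Char) (k : Nat) (xs : List Char)
    (hlast : ∀ h' : xs ≠ [], xs.getLast h' ≠ c) (hk : 1 ≤ k) :
    drkSpec (xs ++ List.replicate k c) = drkSpec xs ++ drkEmit c k :=
  drkSpec_append_replicate_aux c k hk xs.length xs (Nat.le_refl _) hlast

theorem drkEmit_reverse (c : Char) (k : Nat) : (drkEmit c k).reverse = drkEmit c k := by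
  unfold drkEmit; split_ifs <;> simp

theorem bLoop_eq_aux : ∀ (n : Nat) (s : List Char) (acc : List String), s.length ≤ n →
    bLoop s acc = acc ++ (drkSpec s).reverse := by
  intro n
  induction n with
  | zero =>
    intro s acc hlen
    have hx : s = [] := List.eq_nil_of_length_eq_zero (by omega)
    subst hx
    rw [bLoop, drkSpec]
    simp
  | succ n ih =>
    intro s acc hlen
    by_cases h : s = []
    · subst h; rw [bLoop, drkSpec]; simp
    · rw [bLoop, dif_pos h]
      obtain ⟨hdecomp, hlastd, hk⟩ := rstrip_decomp s h
      have hlt := rstripRun_length_lt s h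
      rw [ih (rstripRun s (s.getLast h)) _ (by omega)]
      have hspec : drkSpec s
          = drkSpec (rstripRun s (s.getLast h))
            ++ drkEmit (s.getLast h) (s.length - (rstripRun s (s.getLast h)).length) := by
        conv_lhs => rw [hdecomp]
        exact drkSpec_append_replicate _ _ _ hlastd hk
      rw [hspec, List.reverse_append, drkEmit_reverse, drkEmit]
      split_ifs <;> simp

theorem bLoop_eq (s : List Char) (acc : List String) :
    bLoop s acc = acc ++ (drkSpec s).reverse :=
  bLoop_eq_aux s.length s acc (Nat.le_refl _)

-- ===== VERDICT (by name: the statement is the Claim_ definition above) =====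
theorem dreifachkonsonanten_spec : Claim_equal_dreifachkonsonanten := by
  intro satz _
  unfold Spec_dreifachkonsonanten dreifachkonsonanten dreifachkonsonanten_alt
  rw [drkOuter_eq_spec, bLoop_eq]
  simp
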